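-- pv_equiv track=rewrite | github.com/timid-one/cs-115 | Lab/life_starter/life.py | diagonalize
-- ===== SOURCE A (Python) =====
-- def createOneRow(width):
--     """Returns one row of zeros of width "width"...
--        You should use this in your
--        createBoard(width, height) function.
--        input width: a whole number"""
--     row = []
--     for col in range(width):
--         row += [0]
--     return row
--
-- def createBoard(width, height):
--     """returns a 2d array with "height" rows and "width" cols
--     input width: a whole number
--     input height: a whole number"""
--     A = []
--     for row in range(height):
--         A += [createOneRow(width)] # What do you need to add a whole row here?
--     return A
--
-- def diagonalize(width,height):
--     """ creates an empty board and then modifies it so that it has a diagonal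
--     strip of "on" cells.
--     input width: a whole number
--     input height: a whole number"""
--     A = createBoard(width, height)
--     for row in range(height):
--         for col in range(width):
--             if row == col:
--                 A[row][col] = 1
--             else:
--                 A[row][col] = 0
--     return A
-- ===== SOURCE B (Python) =====
-- def diagonalize(width, height):
--     """Shift-register build: start from the first diagonal row [1,0,...,0]
--     and obtain each following row by shifting the previous pattern one cell
--     to the right ([0] + row[:-1]); once the 1 falls off the end the rows
--     stay all zero.  No per-cell index test anywhere."""
--     if height <= 0:
--         return []
--     if width <= 0:
--         return [[] for _ in range(height)]
--     A = []
--     row = [1] + [0] * (width - 1)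
--     for _ in range(height):
--         A.append(row)
--         row = [0] + row[:-1]
--     return A
-- ===== Notes on version B (the rewrite author's own statement) =====
-- stated objective: alternative
-- what changed: Replaced A's build-then-rewrite nested per-cell double loop with a shift-register build: the first diagonal row [1,0,...,0] is computed once and each following row is the previous pattern shifted one cell right ([0]+row[:-1]), with early returns for empty boards.
import Mathlib
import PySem

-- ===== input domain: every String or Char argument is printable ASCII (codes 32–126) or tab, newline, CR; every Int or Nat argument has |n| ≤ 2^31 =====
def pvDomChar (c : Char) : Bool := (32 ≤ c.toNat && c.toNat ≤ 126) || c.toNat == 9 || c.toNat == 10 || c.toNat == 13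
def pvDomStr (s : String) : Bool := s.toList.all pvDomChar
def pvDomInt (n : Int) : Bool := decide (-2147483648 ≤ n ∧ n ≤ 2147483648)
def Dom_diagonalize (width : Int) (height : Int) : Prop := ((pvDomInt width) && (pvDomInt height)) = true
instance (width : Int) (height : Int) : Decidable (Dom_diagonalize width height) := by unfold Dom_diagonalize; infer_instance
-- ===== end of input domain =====

-- B builds the board as a shift register: the first diagonal row [1,0,...,0] is shifted
-- one cell right per emitted row, replacing A's build-then-rewrite nested per-cell loops;
-- objective: alternative.

-- ===== PORT A =====
-- createOneRow: row = []; for col in range(width): row += [0]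
def createOneRowA (width : Int) : List Int :=
  (PySem.List.pyRange 0 width 1).foldl (fun row _ => row ++ [0]) []

-- createBoard: A = []; for row in range(height): A += [createOneRow(width)]
def createBoardA (width : Int) (height : Int) : List (List Int) :=
  (PySem.List.pyRange 0 height 1).foldl (fun A _ => A ++ [createOneRowA width]) []

-- A[row][col] = v : row and col come from range(...) so they are nonnegative and in
-- range of the freshly built board; List.set with .toNat is exact there.
def diagonalize (width : Int) (height : Int) : List (List Int) :=
  (PySem.List.pyRange 0 height 1).foldl (fun A row =>
    (PySem.List.pyRange 0 width 1).foldl (fun A col =>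
      if row == col then
        A.set row.toNat ((A.getD row.toNat []).set col.toNat 1)
      else
        A.set row.toNat ((A.getD row.toNat []).set col.toNat 0)) A)
    (createBoardA width height)

-- ===== PORT B =====
-- if height <= 0: return []
-- if width <= 0: return [[] for _ in range(height)]
-- A = []; row = [1] + [0]*(width-1)
-- for _ in range(height): A.append(row); row = [0] + row[:-1]
def diagonalize_alt (width : Int) (height : Int) : List (List Int) :=
  if height ≤ 0 then []
  else if width ≤ 0 then
    List.replicate height.toNat ([] : List Int)
  else
    ((PySem.List.pyRange 0 height 1).foldl
      (fun (p : List (List Int) × List Int) _ =>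
        (p.1 ++ [p.2], (0 : Int) :: PySem.List.slice p.2 none (some (-1))))
      ([], [1] ++ List.replicate (width - 1).toNat 0)).1

-- ===== PRECONDITION & SPEC =====
def Spec_diagonalize (width : Int) (height : Int) (out : List (List Int)) : Prop := out = diagonalize_alt width height
instance (width : Int) (height : Int) (out : List (List Int)) : Decidable (Spec_diagonalize width height out) := by unfold Spec_diagonalize; infer_instance

-- ===== CLAIM (what is proved, stated in full; the proofs are below) =====
def Claim_equal_diagonalize : Prop := ∀ (width : Int) (height : Int), Dom_diagonalize width height → Spec_diagonalize width height (diagonalize width height)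

-- ===== LEMMAS AND PROOFS =====

-- the common normal form both ports are reduced to
def diagRow (w : Nat) (r : Nat) : List Int := (List.range w).map (fun c => if r = c then 1 else 0)

-- append-a-constant fold = replicate
theorem foldl_append_zero {α : Type} (l : List α) (init : List Int) :
    l.foldl (fun row _ => row ++ [(0 : Int)]) init = init ++ List.replicate l.length 0 := by
  induction l generalizing init with
  | nil => simp
  | cons x xs ih => simp [List.foldl_cons, ih, List.replicate_succ]

theorem createOneRowA_eq (width : Int) :
    createOneRowA width = List.replicate width.toNat 0 := by
  rw [createOneRowA, foldl_append_zero]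
  simp [PySem.List.length_pyRange_one]

-- append-an-element fold = map
theorem foldl_append_map {α β : Type} (l : List α) (f : α → β) (init : List β) :
    l.foldl (fun A x => A ++ [f x]) init = init ++ l.map f := by
  induction l generalizing init with
  | nil => simp
  | cons x xs ih => simp [List.foldl_cons, ih]

theorem createBoardA_eq (width height : Int) :
    createBoardA width height = List.replicate height.toNat (List.replicate width.toNat 0) := by
  rw [createBoardA, foldl_append_map (PySem.List.pyRange 0 height 1)
      (fun _ => createOneRowA width) ([] : List (List Int))]
  simp [createOneRowA_eq, PySem.List.length_pyRange_one, List.map_const']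

-- inner column loop on the board = one set of the row to the folded row value
theorem inner_fold_set (n : Nat) (row : Nat) (g : Nat → Int) (A : List (List Int))
    (hrow : row < A.length) :
    (List.range n).foldl (fun A c => A.set row ((A.getD row []).set c (g c))) A
      = A.set row ((List.range n).foldl (fun r c => r.set c (g c)) (A.getD row [])) := by
  induction n with
  | zero =>
      simp only [List.range_zero, List.foldl_nil, List.getD_eq_getElem?_getD,
        List.getElem?_eq_getElem hrow, Option.getD_some]
      exact (List.set_getElem_self hrow).symm
  | succ m ih =>
      rw [List.range_succ, List.foldl_append, ih, List.foldl_cons, List.foldl_nil]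
      have h1 : (A.set row ((List.range m).foldl (fun r c => r.set c (g c)) (A.getD row []))).getD row []
          = (List.range m).foldl (fun r c => r.set c (g c)) (A.getD row []) := by
        simp [List.getD_eq_getElem?_getD, hrow]
      rw [h1, List.set_set, List.foldl_append, List.foldl_cons, List.foldl_nil]

-- overwriting every cell of a row in order = map
theorem setfold_eq_map (m : Nat) (g : Nat → Int) (r : List Int) (hm : m ≤ r.length) :
    (List.range m).foldl (fun r c => r.set c (g c)) r
      = (List.range m).map g ++ r.drop m := by
  induction m with
  | zero => simp
  | succ k ih =>
      rw [List.range_succ, List.foldl_append, ih (by omega), List.foldl_cons, List.foldl_nil]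
      have hk : k < r.length := by omega
      rw [List.set_append_right _ _ (by simp)]
      have h2 : (List.drop k r).set (k - (List.map g (List.range k)).length) (g k)
          = g k :: List.drop (k+1) r := by
        simp only [List.length_map, List.length_range, Nat.sub_self]
        rw [List.drop_eq_getElem_cons hk]; rfl
      rw [h2]
      simp

-- the outer row loop over a long-enough board = map over the prefix
theorem outer_fold_eq (w' : Nat) (g : Nat → Nat → Int) :
    ∀ (m : Nat) (A : List (List Int)), m ≤ A.length →
    (List.range m).foldl (fun A r =>
        (List.range w').foldl (fun A c => A.set r ((A.getD r []).set c (g r c))) A) A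
      = (List.range m).map (fun r =>
          (List.range w').foldl (fun l c => l.set c (g r c)) (A.getD r [])) ++ A.drop m := by
  intro m
  induction m with
  | zero => simp
  | succ k ih =>
      intro A hA
      rw [List.range_succ, List.foldl_append, ih A (by omega), List.foldl_cons, List.foldl_nil]
      have hk : k < A.length := by omega
      set P := (List.range k).map (fun r =>
          (List.range w').foldl (fun l c => l.set c (g r c)) (A.getD r [])) with hP
      have hPlen : P.length = k := by simp [hP]
      have hlen : k < (P ++ A.drop k).length := by simp [hPlen]; omega
      rw [inner_fold_set w' k (g k) _ hlen]
      have hget : (P ++ A.drop k).getD k [] = A.getD k [] := by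
        rw [List.getD_eq_getElem?_getD, List.getElem?_append_right (by omega),
          List.getElem?_drop, List.getD_eq_getElem?_getD]
        simp [hPlen]
      rw [hget, List.drop_eq_getElem_cons hk, List.set_append_right _ _ (by omega)]
      have h3 : k - (P.length) = 0 := by omega
      rw [h3, List.set_cons_zero, List.map_append, hP]
      simp [List.getD_eq_getElem?_getD, List.getElem?_eq_getElem hk]

-- port A reduced to the normal form
theorem diagonalize_eq_norm (width height : Int) :
    diagonalize width height
      = (List.range height.toNat).map (diagRow width.toNat) := by
  unfold diagonalize
  rw [createBoardA_eq]
  rw [PySem.List.pyRange_one 0 height, PySem.List.pyRange_one 0 width]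
  simp only [Int.sub_zero, Int.zero_add, List.foldl_map]
  have hbody : (fun (A : List (List Int)) (r : Nat) =>
      (List.range width.toNat).foldl
        (fun A (c : Nat) =>
          if ((r : Int)) == ((c : Int)) then
            A.set (Int.toNat r) ((A.getD (Int.toNat r) []).set (Int.toNat c) 1)
          else
            A.set (Int.toNat r) ((A.getD (Int.toNat r) []).set (Int.toNat c) 0)) A)
    = (fun (A : List (List Int)) (r : Nat) =>
      (List.range width.toNat).foldl
        (fun A (c : Nat) => A.set r ((A.getD r []).set c (if r = c then (1:Int) else 0))) A) := by
    funext A r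
    congr 1
    funext A c
    simp only [beq_iff_eq, Int.natCast_inj, Int.toNat_natCast]
    by_cases h : r = c
    · rw [if_pos h, if_pos h]
    · rw [if_neg h, if_neg h]
  rw [hbody, outer_fold_eq width.toNat (fun r c => if r = c then (1:Int) else 0)
    height.toNat _ (by simp)]
  simp only [List.drop_replicate, Nat.sub_self, List.replicate_zero, List.append_nil]
  apply List.map_congr_left
  intro r hr
  have hr' : r < height.toNat := List.mem_range.mp hr
  rw [List.getD_eq_getElem?_getD, List.getElem?_replicate_of_lt hr']
  simp only [Option.getD_some]
  rw [setfold_eq_map width.toNat _ _ (by simp)]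
  simp [diagRow]

-- shifting a diagonal row one cell right advances its index
theorem diagRow_shift (w : Nat) (hw : 0 < w) (r : Nat) :
    (0 : Int) :: (diagRow w r).dropLast = diagRow w (r + 1) := by
  apply List.ext_getElem
  · simp [diagRow]; omega
  · intro i hi1 hi2
    match i with
    | 0 => simp [diagRow]
    | Nat.succ j =>
        have hj : j < w := by simp [diagRow] at hi1; omega
        simp only [List.getElem_cons_succ, List.getElem_dropLast, diagRow,
          List.getElem_map, List.getElem_range]
        by_cases h : r = j
        · rw [if_pos h, if_pos (by omega)]
        · rw [if_neg h, if_neg (by omega)]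

-- the shift-register fold emits consecutive diagonal rows
theorem shift_fold (w : Nat) (hw : 0 < w) (l : List Int) :
    ∀ (k : Nat) (acc : List (List Int)),
    l.foldl (fun (p : List (List Int) × List Int) _ =>
        (p.1 ++ [p.2], (0 : Int) :: p.2.dropLast)) (acc, diagRow w k)
      = (acc ++ (List.range l.length).map (fun i => diagRow w (k + i)), diagRow w (k + l.length)) := by
  induction l with
  | nil => intro k acc; simp
  | cons x xs ih =>
      intro k acc
      rw [List.foldl_cons]
      have hstep : ((0 : Int) :: (diagRow w k).dropLast) = diagRow w (k + 1) :=
        diagRow_shift w hw k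
      rw [hstep, ih (k + 1) (acc ++ [diagRow w k])]
      simp only [List.length_cons, List.range_succ_eq_map, List.map_cons, List.map_map,
        Prod.mk.injEq]
      constructor
      · rw [List.append_assoc]
        simp [Function.comp, Nat.add_comm, Nat.add_left_comm]
      · congr 1
        omega

-- B's first row is the diagonal row at index 0
theorem firstRow_eq (width : Int) (hw : 0 < width) :
    [(1 : Int)] ++ List.replicate (width - 1).toNat 0 = diagRow width.toNat 0 := by
  have h1 : (width - 1).toNat = width.toNat - 1 := by omega
  apply List.ext_getElem
  · simp [diagRow, h1]; omega
  · intro i hi1 hi2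
    match i with
    | 0 =>
        have h0 : 0 < width.toNat := by omega
        simp [diagRow]
    | Nat.succ j =>
        simp only [List.singleton_append, List.getElem_cons_succ, List.getElem_replicate,
          diagRow, List.getElem_map, List.getElem_range]
        rw [if_neg (by omega)]

-- port B reduced to the same normal form
theorem diagonalize_alt_eq_norm (width height : Int) :
    diagonalize_alt width height
      = (List.range height.toNat).map (diagRow width.toNat) := by
  unfold diagonalize_alt
  by_cases hh : height ≤ 0
  · rw [if_pos hh]
    have h0 : height.toNat = 0 := by omega
    rw [h0]
    simp
  rw [if_neg hh]
  by_cases hw : width ≤ 0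
  · rw [if_pos hw]
    have h0 : width.toNat = 0 := by omega
    rw [h0]
    apply List.ext_getElem
    · simp
    · intro i hi1 hi2
      simp [diagRow]
  · rw [if_neg hw]
    have hw' : 0 < width := by omega
    have hb : (fun (p : List (List Int) × List Int) (_ : Int) =>
        (p.1 ++ [p.2], (0 : Int) :: PySem.List.slice p.2 none (some (-1))))
      = (fun (p : List (List Int) × List Int) _ =>
        (p.1 ++ [p.2], (0 : Int) :: p.2.dropLast)) := by
      funext p x
      rw [PySem.List.slice_to_neg_one]
    rw [hb, firstRow_eq width hw',
      shift_fold width.toNat (by omega) (PySem.List.pyRange 0 height 1) 0 []]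
    simp [PySem.List.length_pyRange_one]

-- ===== VERDICT (by name: the statement is the Claim_ definition above) =====
theorem diagonalize_spec : Claim_equal_diagonalize := by
  intro width height _
  unfold Spec_diagonalize
  rw [diagonalize_eq_norm, diagonalize_alt_eq_norm]
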